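-- pv_equiv track=rewrite | github.com/deniskolokol/genery | genery/utils/textutils.py | remove_repeated_punctuation
-- ===== SOURCE A (Python) =====
-- from string import ascii_lowercase, ascii_letters, digits, punctuation
-- from itertools import groupby
--
-- def remove_repeated_punctuation(text):
--     """
--     Removes repeated puntuation such as '???' or '...'.
--     Warning: it will remove '...' from the end of the sentence
--              so use only when this isn't necessary.
--     """
--     result = []
--     for key, grouper in groupby(text):
--         if key in punctuation:
--             result.append(key)
--         else:
--             result.extend(grouper)
--
--     return ''.join(result)
-- ===== SOURCE B (Python) =====
-- from string import punctuation
--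
-- def remove_repeated_punctuation(text):
--     """One-pass scan: drop a punctuation char that equals the previous char."""
--     out = []
--     prev = None
--     for ch in text:
--         if not (ch == prev and ch in punctuation):
--             out.append(ch)
--         prev = ch
--     return ''.join(out)
-- ===== Notes on version B (the rewrite author's own statement) =====
-- stated objective: simpler
-- what changed: Replaces the itertools.groupby pass (materialising each run, then branching per group) with a single linear scan that keeps a character unless it is punctuation equal to the previous character.
import Mathlib
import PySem

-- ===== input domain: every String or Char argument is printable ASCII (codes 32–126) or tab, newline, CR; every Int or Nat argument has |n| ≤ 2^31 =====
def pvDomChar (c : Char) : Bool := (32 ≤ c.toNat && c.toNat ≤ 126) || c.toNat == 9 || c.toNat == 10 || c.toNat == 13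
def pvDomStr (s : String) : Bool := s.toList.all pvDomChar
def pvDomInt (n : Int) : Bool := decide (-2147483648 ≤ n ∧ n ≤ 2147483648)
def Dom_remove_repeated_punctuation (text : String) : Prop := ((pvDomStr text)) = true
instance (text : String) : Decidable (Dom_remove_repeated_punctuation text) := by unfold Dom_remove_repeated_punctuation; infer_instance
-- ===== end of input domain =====

-- B replaces the groupby-over-runs loop with a single previous-character scan (objective: simpler).


-- string.punctuation
def pvPunct : List Char := "!\"#$%&'()*+,-./:;<=>?@[\\]^_`{|}~".toList

-- ===== PORT A =====
-- itertools.groupby(text): successive maximal runs of equal characters; for each run,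
-- append just the key if it is punctuation, otherwise extend with the whole run.
def rrpGroups (l : List Char) : List Char :=
  match l with
  | [] => []
  | c :: rest =>
      (if c ∈ pvPunct then [c] else c :: rest.takeWhile (· = c)) ++
        rrpGroups (rest.dropWhile (· = c))
termination_by l.length
decreasing_by
  simp only [List.length_cons]
  exact Nat.lt_succ_of_le (List.length_dropWhile_le _ _)

def remove_repeated_punctuation (text : String) : String :=
  String.ofList (rrpGroups text.toList)

-- ===== PORT B =====
-- one-pass loop carrying the previous character
def rrpScan (prev : Option Char) (l : List Char) : List Char :=
  match l with
  | [] => []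
  | c :: rest =>
      (if prev = some c ∧ c ∈ pvPunct then [] else [c]) ++ rrpScan (some c) rest

def remove_repeated_punctuation_alt (text : String) : String :=
  String.ofList (rrpScan none text.toList)

-- ===== PRECONDITION & SPEC =====
def Spec_remove_repeated_punctuation (text : String) (out : String) : Prop := out = remove_repeated_punctuation_alt text
instance (text : String) (out : String) : Decidable (Spec_remove_repeated_punctuation text out) := by unfold Spec_remove_repeated_punctuation; infer_instance

-- ===== CLAIM (what is proved, stated in full; the proofs are below) =====
def Claim_equal_remove_repeated_punctuation : Prop := ∀ (text : String), Dom_remove_repeated_punctuation text → Spec_remove_repeated_punctuation text (remove_repeated_punctuation text)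

-- ===== LEMMAS AND PROOFS =====
theorem rrpScan_some (l : List Char) : ∀ c : Char,
    rrpScan (some c) l =
      (if c ∈ pvPunct then [] else l.takeWhile (· = c)) ++ rrpGroups (l.dropWhile (· = c)) := by
  induction l with
  | nil => intro c; simp [rrpScan, rrpGroups]
  | cons d t ih =>
    intro c
    by_cases hdc : d = c
    · subst hdc
      simp only [rrpScan, List.takeWhile_cons, List.dropWhile_cons, decide_true, ih d]
      by_cases hp : d ∈ pvPunct <;> simp [hp]
    · have hdc' : decide (d = c) = false := by simp [hdc]
      simp only [rrpScan, List.takeWhile_cons, List.dropWhile_cons, hdc',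
        Bool.false_eq_true, if_false]
      rw [rrpGroups, ih d]
      have hcd : ¬ c = d := fun h => hdc h.symm
      by_cases hp : d ∈ pvPunct <;> by_cases hq : c ∈ pvPunct <;> simp [hp, hq, hcd]

theorem rrpScan_none (l : List Char) : rrpScan none l = rrpGroups l := by
  cases l with
  | nil => rw [rrpGroups]; rfl
  | cons c t =>
    rw [rrpGroups]
    simp only [rrpScan, rrpScan_some]
    by_cases hp : c ∈ pvPunct <;> simp [hp]

-- ===== VERDICT (by name: the statement is the Claim_ definition above) =====
theorem remove_repeated_punctuation_spec : Claim_equal_remove_repeated_punctuation := by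
  intro text _
  unfold Spec_remove_repeated_punctuation remove_repeated_punctuation remove_repeated_punctuation_alt
  rw [rrpScan_none]
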